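-- pv_equiv track=rewrite | github.com/Google-DSC-SCH/2022-GDSCSCH-AlgorithmStudy | 06_손민기/5주차/디펜스 게임.py | solution
-- ===== SOURCE A (Python) =====
-- import heapq
--
-- def solution(n, k, enemy):
--     answer = 0
--     total = 0
--     heap = []
--
--     for e in enemy:
--         heapq.heappush(heap, -e)
--         total += e
--
--         if n < total:
--             if k == 0:
--                 break
--
--             total += heapq.heappop(heap)
--             k -= 1
--
--         answer += 1
--
--     return answer
-- ===== SOURCE B (Python) =====
-- def solution(n, k, enemy):
--     # Greedy, kept bare: hold just the list of waves currently fought;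
--     # on overflow retire the strongest fought wave (or stop when out of skips).
--     answer = 0
--     fought = []
--     for e in enemy:
--         fought.append(e)
--         if sum(fought) > n:
--             if k == 0:
--                 break
--             fought.remove(max(fought))
--             k -= 1
--         answer += 1
--     return answer
-- ===== Notes on version B (the rewrite author's own statement) =====
-- stated objective: simpler
-- what changed: A maintains a negated max-heap of fought waves plus a running damage total; B drops both and keeps only the bare list of currently-fought waves, recomputing the damage sum each round and retiring the strongest wave with max/remove on overflow.
import Mathlib
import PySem

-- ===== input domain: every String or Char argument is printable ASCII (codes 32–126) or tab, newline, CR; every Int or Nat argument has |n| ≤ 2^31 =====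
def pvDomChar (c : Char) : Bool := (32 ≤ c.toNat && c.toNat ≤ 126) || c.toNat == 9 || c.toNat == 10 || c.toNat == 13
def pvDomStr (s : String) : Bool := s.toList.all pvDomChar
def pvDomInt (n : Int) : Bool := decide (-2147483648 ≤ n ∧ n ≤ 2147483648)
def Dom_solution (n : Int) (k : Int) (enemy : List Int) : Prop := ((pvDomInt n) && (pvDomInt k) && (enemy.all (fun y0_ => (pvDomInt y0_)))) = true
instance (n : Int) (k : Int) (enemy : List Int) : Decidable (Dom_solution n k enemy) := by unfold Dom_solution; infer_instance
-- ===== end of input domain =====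

-- B keeps only the bare list of currently-fought waves (no heap, no negation, no running total),
-- recomputing the damage sum each round; same return value, plainer state.

-- ===== PORT A =====
-- The Python heap is observed only through heappush / heappop-min, so it is modelled exactly
-- by a list kept sorted ascending: heappush = orderedInsert, heappop = (headI, tail).
def solGoA (n : Int) : List Int → Int → Int → List Int → Int → Int
  | [], ans, _, _, _ => ans
  | e :: rest, ans, total, heap, k =>
    let heap1 := List.orderedInsert (· ≤ ·) (-e) heap   -- heapq.heappush(heap, -e)
    let total1 := total + e
    if n < total1 then
      if k = 0 then ans                                  -- break
      else solGoA n rest (ans + 1) (total1 + heap1.headI) heap1.tail (k - 1)  -- total += heappop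
    else solGoA n rest (ans + 1) total1 heap1 k

def solution (n : Int) (k : Int) (enemy : List Int) : Int :=
  solGoA n enemy 0 0 [] k

-- ===== PORT B =====
def solGoB (n : Int) : List Int → Int → List Int → Int → Int
  | [], ans, _, _ => ans
  | e :: rest, ans, fought, k =>
    let fought1 := fought ++ [e]                         -- fought.append(e)
    if n < fought1.sum then                              -- sum(fought) > n
      if k = 0 then ans                                  -- break
      else
        match PySem.List.max? fought1 (fun x => x) with  -- max(fought)
        | none => ans                                    -- unreachable: fought1 is nonempty
        | some m =>
          match PySem.List.remove? fought1 m with        -- fought.remove(strongest)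
          | none => ans                                  -- unreachable: m ∈ fought1
          | some fought2 => solGoB n rest (ans + 1) fought2 (k - 1)
    else solGoB n rest (ans + 1) fought1 k

def solution_alt (n : Int) (k : Int) (enemy : List Int) : Int :=
  solGoB n enemy 0 [] k

-- ===== PRECONDITION & SPEC =====
def Spec_solution (n : Int) (k : Int) (enemy : List Int) (out : Int) : Prop := out = solution_alt n k enemy
instance (n : Int) (k : Int) (enemy : List Int) (out : Int) : Decidable (Spec_solution n k enemy out) := by unfold Spec_solution; infer_instance

-- ===== CLAIM (what is proved, stated in full; the proofs are below) =====
def Claim_equal_solution : Prop := ∀ (n : Int) (k : Int) (enemy : List Int), Dom_solution n k enemy → Spec_solution n k enemy (solution n k enemy)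

-- ===== LEMMAS AND PROOFS =====

-- head of a ≤-sorted cons is a lower bound for the whole list
lemma head_min {m : Int} {t : List Int} (h : (m :: t).Pairwise (· ≤ ·)) :
    ∀ x ∈ m :: t, m ≤ x := by
  intro x hx
  rcases List.mem_cons.1 hx with rfl | hx
  · exact le_refl x
  · exact (List.pairwise_cons.1 h).1 x hx

-- the bisimulation: A's (total, sorted negated heap) against B's bare fought list
lemma go_eq (n : Int) : ∀ (rest : List Int) (ans total : Int) (heap : List Int) (k : Int)
    (fought : List Int), heap.Pairwise (· ≤ ·) → (heap.map (fun x => -x)).Perm fought →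
    total = fought.sum →
    solGoA n rest ans total heap k = solGoB n rest ans fought k := by
  intro rest
  induction rest with
  | nil => intro ans total heap k fought _ _ _; rfl
  | cons e rest ih =>
    intro ans total heap k fought hs hperm htot
    have hpermA1 : (List.orderedInsert (· ≤ ·) (-e) heap).Perm (-e :: heap) :=
      List.perm_orderedInsert _ _ heap
    have hsA1 : (List.orderedInsert (· ≤ ·) (-e) heap).Pairwise (· ≤ ·) :=
      List.Pairwise.orderedInsert _ heap hs
    have hlenA1 : (List.orderedInsert (· ≤ ·) (-e) heap).length = heap.length + 1 := by
      simpa using hpermA1.length_eq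
    obtain ⟨m0, t0, hmt⟩ := List.exists_cons_of_ne_nil
      (l := List.orderedInsert (· ≤ ·) (-e) heap) (List.ne_nil_of_length_pos (by omega))
    -- the pushed heap and the appended fought list hold the same multiset
    have hperm1 : ((List.orderedInsert (· ≤ ·) (-e) heap).map (fun x => -x)).Perm (fought ++ [e]) := by
      have h1 := hpermA1.map (fun x => -x)
      have h2 : ((-e :: heap).map (fun x => -x)) = e :: heap.map (fun x => -x) := by simp
      have h3 : (e :: heap.map (fun x => -x)).Perm (e :: fought) := List.Perm.cons e hperm
      have h4 : (e :: fought).Perm (fought ++ [e]) := by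
        simpa using (List.perm_middle (a := e) (l₁ := fought) (l₂ := [])).symm
      exact ((h2 ▸ h1).trans h3).trans h4
    have hsum1 : total + e = (fought ++ [e]).sum := by
      rw [List.sum_append]; simp [htot]
    simp only [solGoA, solGoB]
    rw [hsum1]
    by_cases hbr : n < (fought ++ [e]).sum
    · rw [if_pos hbr, if_pos hbr]
      by_cases hkz : k = 0
      · rw [if_pos hkz, if_pos hkz]
      · rw [if_neg hkz, if_neg hkz]
        -- -m0 is the maximum of the shared multiset
        have hmin0 : ∀ x ∈ m0 :: t0, m0 ≤ x := head_min (hmt ▸ hsA1)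
        have hmax : ∀ y ∈ fought ++ [e], y ≤ -m0 := by
          intro y hy
          obtain ⟨a, ha, rfl⟩ := List.mem_map.1 (hperm1.mem_iff.2 hy)
          have := hmin0 a (hmt ▸ ha)
          omega
        have hm0mem : -m0 ∈ fought ++ [e] := by
          apply hperm1.mem_iff.1
          exact List.mem_map.2 ⟨m0, hmt ▸ List.mem_cons_self .., rfl⟩
        -- B's max(fought) finds exactly that value
        obtain ⟨m, hmeq⟩ : ∃ m, PySem.List.max? (fought ++ [e]) (fun x => x) = some m := by
          cases h : PySem.List.max? (fought ++ [e]) (fun x => x) with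
          | none =>
            exact absurd ((PySem.List.max?_eq_none_iff _ _).1 h) (by simp)
          | some m => exact ⟨m, rfl⟩
        have hm_val : m = -m0 := by
          have h1 : m ≤ -m0 := hmax m (PySem.List.max?_mem hmeq)
          have h2 : -m0 ≤ m := PySem.List.max?_isMax hmeq (-m0) hm0mem
          omega
        subst hm_val
        have hrem : PySem.List.remove? (fought ++ [e]) (-m0) = some ((fought ++ [e]).erase (-m0)) :=
          PySem.List.remove?_eq_some_erase _ (-m0) hm0mem
        simp only [hmeq, hrem]
        -- after retiring the strongest wave the two states match again
        have hpermNext : (t0.map (fun x => -x)).Perm ((fought ++ [e]).erase (-m0)) := by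
          have h1 : ((List.orderedInsert (· ≤ ·) (-e) heap).map (fun x => -x)).erase (-m0)
              = t0.map (fun x => -x) := by
            rw [hmt]; simp
          have h2 := hperm1.erase (-m0)
          rw [h1] at h2
          exact h2
        have hsumNext : (fought ++ [e]).sum + m0 = ((fought ++ [e]).erase (-m0)).sum := by
          have h1 : (fought ++ [e]).sum = ((List.orderedInsert (· ≤ ·) (-e) heap).map (fun x => -x)).sum :=
            hperm1.sum_eq.symm
          have h2 : ((fought ++ [e]).erase (-m0)).sum = (t0.map (fun x => -x)).sum :=
            hpermNext.sum_eq.symm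
          rw [h1, h2, hmt]
          simp
        rw [hmt]
        simp only [List.headI, List.tail_cons]
        exact ih (ans + 1) ((fought ++ [e]).sum + m0) t0 (k - 1) ((fought ++ [e]).erase (-m0))
          (List.pairwise_cons.1 (hmt ▸ hsA1)).2 hpermNext hsumNext
    · rw [if_neg hbr, if_neg hbr]
      exact ih (ans + 1) ((fought ++ [e]).sum) (List.orderedInsert (· ≤ ·) (-e) heap) k
        (fought ++ [e]) hsA1 hperm1 rfl

-- ===== VERDICT (by name: the statement is the Claim_ definition above) =====
theorem solution_spec : Claim_equal_solution := by
  intro n k enemy _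
  unfold Spec_solution solution solution_alt
  exact go_eq n enemy 0 0 [] k [] (by simp) (by simp) rfl
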